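-- pv_equiv track=rewrite | github.com/Emilioledo/IP-2025 | python/practicas/practica_6.py | lindo_nombre
-- ===== SOURCE A (Python) =====
-- def lindo_nombre(nombre: str) -> str:
--     letras: int = 0
--     for _ in nombre:
--         letras += 1
--
--     if (letras >= 5):
--         return 'Tu nombre tiene muchas letras!'
--     else:
--         return 'Tu nombre tiene menos de 5 caracteres'
-- ===== SOURCE B (Python) =====
-- def lindo_nombre(nombre: str) -> str:
--     return 'Tu nombre tiene muchas letras!' if len(nombre) >= 5 else 'Tu nombre tiene menos de 5 caracteres'
-- ===== Notes on version B (the rewrite author's own statement) =====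
-- stated objective: faster
-- what changed: Replaces the per-character counting loop with a direct len(nombre) lookup and a single ternary return.
import Mathlib
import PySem

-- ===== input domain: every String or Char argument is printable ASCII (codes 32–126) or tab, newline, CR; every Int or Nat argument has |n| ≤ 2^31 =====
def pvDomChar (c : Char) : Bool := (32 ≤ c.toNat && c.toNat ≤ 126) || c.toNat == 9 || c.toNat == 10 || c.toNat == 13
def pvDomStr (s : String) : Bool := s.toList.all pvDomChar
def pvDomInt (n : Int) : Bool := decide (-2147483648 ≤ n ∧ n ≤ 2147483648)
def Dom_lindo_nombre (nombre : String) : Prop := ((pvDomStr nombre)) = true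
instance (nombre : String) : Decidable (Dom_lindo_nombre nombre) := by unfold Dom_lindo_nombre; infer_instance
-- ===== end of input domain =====

-- B replaces A's per-character counting loop with a direct length lookup (idiomatic; return value identical).
-- ===== PORT A =====
-- the loop 'for _ in nombre: letras += 1' as a fold accumulating the counter
def lindo_nombre (nombre : String) : String :=
  let letras : Int := nombre.toList.foldl (fun acc _ => acc + 1) 0
  if letras ≥ 5 then "Tu nombre tiene muchas letras!"
  else "Tu nombre tiene menos de 5 caracteres"

-- ===== PORT B =====
-- len(nombre) → PySem.Str.len, single conditional return
def lindo_nombre_alt (nombre : String) : String :=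
  if PySem.Str.len nombre ≥ 5 then "Tu nombre tiene muchas letras!"
  else "Tu nombre tiene menos de 5 caracteres"

-- ===== PRECONDITION & SPEC =====
def Spec_lindo_nombre (nombre : String) (out : String) : Prop := out = lindo_nombre_alt nombre
instance (nombre : String) (out : String) : Decidable (Spec_lindo_nombre nombre out) := by unfold Spec_lindo_nombre; infer_instance

-- ===== CLAIM (what is proved, stated in full; the proofs are below) =====
def Claim_equal_lindo_nombre : Prop := ∀ (nombre : String), Dom_lindo_nombre nombre → Spec_lindo_nombre nombre (lindo_nombre nombre)

-- ===== LEMMAS AND PROOFS =====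
-- the counting fold computes the list length
theorem pv_count_eq_len (l : List Char) (a : Int) :
    l.foldl (fun acc _ => acc + 1) a = a + l.length := by
  induction l generalizing a with
  | nil => simp
  | cons c t ih => simp [List.foldl, ih]; omega

-- ===== VERDICT (by name: the statement is the Claim_ definition above) =====
theorem lindo_nombre_spec : Claim_equal_lindo_nombre := by
  intro nombre _
  unfold Spec_lindo_nombre lindo_nombre lindo_nombre_alt PySem.Str.len
  simp [pv_count_eq_len]
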